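-- pv_equiv track=rewrite | github.com/mahaboobsub/ExamReadyFastAPI | app/services/board_exam_generator.py | _calculate_section_blooms
-- ===== SOURCE A (Python) =====
-- from typing import Dict, List, Any
--
-- def _calculate_section_blooms(section: Dict, overall_blooms: Dict, count: int) -> Dict[str, int]:
--     """
--     Distributes questions across Bloom's taxonomy levels.
--
--     Args:
--         section: Section configuration
--         overall_blooms: Template-level Bloom's distribution (percentages)
--         count: Number of questions in this section
--
--     Returns:
--         Dictionary mapping Bloom's level to question count
--     """
--     dist = {}
--     total_assigned = 0
--
--     # Sort by percentage (descending) to handle largest chunks first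
--     sorted_blooms = sorted(overall_blooms.items(), key=lambda x: x[1], reverse=True)
--
--     # Assign proportional counts to each level
--     for level, pct in sorted_blooms[:-1]:
--         num = round((pct / 100) * count)
--         dist[level] = num
--         total_assigned += num
--
--     # Assign remainder to last level (ensures sum matches exactly)
--     last_level = sorted_blooms[-1][0]
--     dist[last_level] = max(0, count - total_assigned)
--
--     return dist
-- ===== SOURCE B (Python) =====
-- def _calculate_section_blooms(section, overall_blooms, count):
--     """Selection-based distribution: repeatedly extract the highest-percentage
--     level and assign its rounded share; the single remaining level gets the
--     remainder. No sorting pass; same result as the sort-then-slice version."""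
--     items = list(overall_blooms.items())
--     dist = {}
--     total_assigned = 0
--     while len(items) > 1:
--         mi = 0
--         for j in range(1, len(items)):
--             if items[j][1] > items[mi][1]:
--                 mi = j
--         level, pct = items.pop(mi)
--         num = round((pct / 100) * count)
--         dist[level] = num
--         total_assigned += num
--     dist[items[0][0]] = max(0, count - total_assigned)
--     return dist
-- ===== Notes on version B (the rewrite author's own statement) =====
-- stated objective: alternative
-- what changed: Replaces sort-descending / slice-off-last / negative-index remainder assignment by a selection loop that repeatedly scans for the first highest-percentage level, pops and assigns it, and gives the remainder to the single level left over; no sorting, slicing or negative indexing; Pre_ excludes only the empty overall_blooms, on which both versions raise IndexError.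
import Mathlib
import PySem

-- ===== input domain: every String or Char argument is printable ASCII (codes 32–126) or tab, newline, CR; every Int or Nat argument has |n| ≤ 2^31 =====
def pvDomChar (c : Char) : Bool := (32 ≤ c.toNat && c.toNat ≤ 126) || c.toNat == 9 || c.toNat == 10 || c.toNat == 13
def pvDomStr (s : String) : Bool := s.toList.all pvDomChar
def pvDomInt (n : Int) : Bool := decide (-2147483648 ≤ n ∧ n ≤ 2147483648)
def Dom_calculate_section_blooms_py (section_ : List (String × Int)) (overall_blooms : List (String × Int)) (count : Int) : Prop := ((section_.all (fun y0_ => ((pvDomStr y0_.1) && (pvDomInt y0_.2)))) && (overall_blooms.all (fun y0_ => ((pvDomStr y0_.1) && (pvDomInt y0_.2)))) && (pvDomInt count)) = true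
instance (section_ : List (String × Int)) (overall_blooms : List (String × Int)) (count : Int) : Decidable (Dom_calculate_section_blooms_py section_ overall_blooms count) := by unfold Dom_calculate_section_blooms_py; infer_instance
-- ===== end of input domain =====

-- B replaces A's sort/slice/negative-index pipeline by a selection loop that repeatedly
-- extracts the first highest-percentage level (alternative decomposition, same results).


-- A-side hand-port of the float expression `round((pct / 100) * count)`: exact IEEE-754 double
-- emulation (correctly rounded pct/100, correctly rounded product, round-half-to-even to int),
-- exact on |pct| ≤ 2^31.
def pvRne (n d : Nat) : Nat :=
  let q := n / d
  let r := n % d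
  if d < 2 * r ∨ (2 * r = d ∧ q % 2 = 1) then q + 1 else q

def pvFindS (n : Nat) : Nat := (((List.range 70).find? (fun s => decide (100 * 2 ^ 52 ≤ n * 2 ^ s))).getD 70)

-- nearest double to n/100 (n ≥ 1) as (significand, binary exponent)
def pvDiv100 (n : Nat) : Nat × Int :=
  let s := pvFindS n
  let m := pvRne (n * 2 ^ s) 100
  if m = 2 ^ 53 then (2 ^ 52, -(s : Int) + 1) else (m, -(s : Int))

-- correctly rounded product (m·2^e)·c, c ≥ 1
def pvMulNorm (m : Nat) (e : Int) (c : Nat) : Nat × Int :=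
  let P := m * c
  let b := Nat.log2 P + 1
  if b ≤ 53 then (P, e) else
    let sh := b - 53
    let m2 := pvRne P (2 ^ sh)
    if m2 = 2 ^ 53 then (2 ^ 52, e + (sh : Int) + 1) else (m2, e + (sh : Int))

def pvF64ToIntRNE (m : Nat) (e : Int) : Nat :=
  if 0 ≤ e then m * 2 ^ e.toNat else pvRne m (2 ^ (-e).toNat)

def pyRoundPctCount (p c : Int) : Int :=
  if p = 0 ∨ c = 0 then 0
  else
    let sgn : Int := if (0 < p ∧ 0 < c) ∨ (p < 0 ∧ c < 0) then 1 else -1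
    let d1 := pvDiv100 p.natAbs
    let d2 := pvMulNorm d1.1 d1.2 c.natAbs
    sgn * (pvF64ToIntRNE d2.1 d2.2 : Int)

-- ===== PORT A =====
def calculate_section_blooms_py (section_ : List (String × Int)) (overall_blooms : List (String × Int)) (count : Int) : List (String × Int) :=
  let sorted_blooms := PySem.List.sorted overall_blooms (fun x => x.2) true
  let st := (PySem.List.slice sorted_blooms none (some (-1))).foldl
      (fun (st : PySem.Dict String Int × Int) lp =>
        let num := pyRoundPctCount lp.2 count
        (st.1.insert lp.1 num, st.2 + num))
      (PySem.Dict.empty, (0 : Int))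
  match PySem.List.pyGet? sorted_blooms (-1) with
  | none => st.1.items      -- Python raises IndexError here (empty overall_blooms); excluded by Pre_
  | some last => (st.1.insert last.1 (max 0 (count - st.2))).items

-- ===== PORT B =====
-- B-side hand-port of the same Python float expression `round((pct / 100) * count)`,
-- written as B's own routines (round-half-up with a tie correction, a fuel-recursive
-- normalisation search, a log2 overflow guard, and a shift for the scale-up):
-- exact IEEE-754 double emulation on |pct| ≤ 2^31, like the A-side port.
def pvHalfEven (num den : Nat) : Nat :=
  let up := (2 * num + den) / (2 * den)
  if 2 * (num % den) = den ∧ up % 2 = 1 then up - 1 else up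

-- smallest shift putting num·2^shift / 100 into [2^52, 2^53), by fuel recursion
def pvShift : Nat → Nat → Nat → Nat
  | 0, _, acc => acc
  | fuel + 1, num, acc =>
      if 100 * 2 ^ 52 ≤ num * 2 ^ acc then acc else pvShift fuel num (acc + 1)

-- nearest double to num/100 as (significand, binary exponent)
def pvQuot100 (num : Nat) : Nat × Int :=
  let sh := pvShift 70 num 0
  let sig := pvHalfEven (num * 2 ^ sh) 100
  if sig = 2 ^ 53 then (2 ^ 52, 1 - (sh : Int)) else (sig, -(sh : Int))

-- correctly rounded product (sig·2^ex)·f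
def pvTimes (sig : Nat) (ex : Int) (f : Nat) : Nat × Int :=
  let prod := sig * f
  if prod < 2 ^ 53 then (prod, ex) else
    let drop := Nat.log2 prod - 52
    let cut := pvHalfEven prod (2 ^ drop)
    if cut = 2 ^ 53 then (2 ^ 52, ex + (drop : Int) + 1) else (cut, ex + (drop : Int))

def pvToInt (sig : Nat) (ex : Int) : Nat :=
  if ex < 0 then pvHalfEven sig (2 ^ (-ex).toNat) else sig <<< ex.toNat

def pyRoundB (pct cnt : Int) : Int :=
  if pct = 0 then 0
  else if cnt = 0 then 0
  else
    let quo := pvQuot100 pct.natAbs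
    let pr := pvTimes quo.1 quo.2 cnt.natAbs
    let v : Int := (pvToInt pr.1 pr.2 : Int)
    if decide (pct < 0) ≠ decide (cnt < 0) then -v else v

-- inner for-loop of Source B: index (as Python int) of the first maximal percentage
def pvBMaxIdx (items : List (String × Int)) : Int :=
  (PySem.List.pyRange 1 (items.length : Int) 1).foldl
    (fun mi j =>
      if (PySem.List.pyGetD items j ("", 0)).2 > (PySem.List.pyGetD items mi ("", 0)).2 then j else mi)
    0

-- while-loop of Source B (items.pop(mi) becomes PySem.List.pop?)
def pvBLoop (count : Int) (items : List (String × Int)) (dist : PySem.Dict String Int) (total : Int) : List (String × Int) :=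
  if h : 1 < items.length then
    match hp : PySem.List.pop? items (pvBMaxIdx items) with
    | some lp =>
        let num := pyRoundB lp.1.2 count
        pvBLoop count lp.2 (dist.insert lp.1.1 num) (total + num)
    | none => dist.items   -- unreachable: the scanned index is always in range
  else
    match PySem.List.pyGet? items 0 with
    | none => dist.items   -- Python raises IndexError here (empty overall_blooms); excluded by Pre_
    | some x => (dist.insert x.1 (max 0 (count - total))).items
termination_by items.length
decreasing_by
  have := PySem.List.length_of_pop?_eq_some items hp
  omega

def calculate_section_blooms_py_alt (section_ : List (String × Int)) (overall_blooms : List (String × Int)) (count : Int) : List (String × Int) :=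
  pvBLoop count overall_blooms PySem.Dict.empty 0

-- ===== PRECONDITION & SPEC =====
-- Pre_ excludes only the empty overall_blooms, on which both Pythons raise IndexError.
def Pre_calculate_section_blooms_py (section_ : List (String × Int)) (overall_blooms : List (String × Int)) (count : Int) : Prop := overall_blooms ≠ []
instance (section_ : List (String × Int)) (overall_blooms : List (String × Int)) (count : Int) : Decidable (Pre_calculate_section_blooms_py section_ overall_blooms count) := by unfold Pre_calculate_section_blooms_py; infer_instance

def pvWitness_calculate_section_blooms_py : (List (String × Int)) × (List (String × Int)) × Int :=
  ([], [("remember", 40), ("apply", 35), ("analyze", 25)], 10)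

def Spec_calculate_section_blooms_py (section_ : List (String × Int)) (overall_blooms : List (String × Int)) (count : Int) (out : List (String × Int)) : Prop := out = calculate_section_blooms_py_alt section_ overall_blooms count
instance (section_ : List (String × Int)) (overall_blooms : List (String × Int)) (count : Int) (out : List (String × Int)) : Decidable (Spec_calculate_section_blooms_py section_ overall_blooms count out) := by unfold Spec_calculate_section_blooms_py; infer_instance

-- ===== CLAIM (what is proved, stated in full; the proofs are below) =====
def Claim_equal_calculate_section_blooms_py : Prop := ∀ (section_ : List (String × Int)) (overall_blooms : List (String × Int)) (count : Int), Dom_calculate_section_blooms_py section_ overall_blooms count → Pre_calculate_section_blooms_py section_ overall_blooms count → Spec_calculate_section_blooms_py section_ overall_blooms count (calculate_section_blooms_py section_ overall_blooms count)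

-- ===== LEMMAS AND PROOFS =====

-- the two hand-ported float stacks agree pointwise
theorem pvHalfEven_eq (num den : Nat) (hd : 0 < den) : pvHalfEven num den = pvRne num den := by
  simp only [pvHalfEven, pvRne]
  set q := num / den with hqdef
  set r := num % den with hrdef
  have key : (2 * num + den) / (2 * den) = q + (2 * r + den) / (2 * den) := by
    have h2 : 2 * num + den = 2 * den * q + (2 * r + den) := by
      rw [mul_assoc, hqdef, hrdef]; linarith [Nat.div_add_mod num den]
    rw [h2, Nat.mul_add_div (by omega)]
  have hr : r < den := by rw [hrdef]; exact Nat.mod_lt num hd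
  clear_value q r
  rw [key]
  clear key hqdef hrdef
  rcases lt_trichotomy (2 * r) den with h | h | h
  · rw [Nat.div_eq_of_lt (show 2 * r + den < 2 * den by omega)]
    split_ifs <;> omega
  · rw [Nat.div_eq_of_lt_le (show 1 * (2 * den) ≤ 2 * r + den by omega)
        (show 2 * r + den < (1 + 1) * (2 * den) by omega)]
    split_ifs <;> omega
  · rw [Nat.div_eq_of_lt_le (show 1 * (2 * den) ≤ 2 * r + den by omega)
        (show 2 * r + den < (1 + 1) * (2 * den) by omega)]
    split_ifs <;> omega

theorem pvShift_go (num : Nat) : ∀ (fuel acc : Nat),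
    pvShift fuel num acc =
      (((List.range' acc fuel).find? (fun s => decide (100 * 2 ^ 52 ≤ num * 2 ^ s))).getD (acc + fuel)) := by
  intro fuel
  induction fuel with
  | zero => intro acc; simp [pvShift]
  | succ f ih =>
    intro acc
    rw [List.range'_succ, pvShift]
    by_cases h : 100 * 2 ^ 52 ≤ num * 2 ^ acc
    · rw [if_pos h, List.find?_cons_of_pos (by simpa using h)]
      rfl
    · rw [if_neg h, List.find?_cons_of_neg (by simpa using h), ih (acc + 1)]
      congr 1
      omega

theorem pvShift_eq (num : Nat) : pvShift 70 num 0 = pvFindS num := by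
  rw [pvShift_go num 70 0, pvFindS, List.range_eq_range']

theorem pvQuot100_eq (num : Nat) : pvQuot100 num = pvDiv100 num := by
  simp only [pvQuot100, pvDiv100]
  rw [pvShift_eq, pvHalfEven_eq _ _ (by omega)]
  split_ifs with h
  · exact Prod.ext rfl (by omega)
  · rfl

theorem pvTimes_eq (sig : Nat) (ex : Int) (f : Nat) : pvTimes sig ex f = pvMulNorm sig ex f := by
  simp only [pvTimes, pvMulNorm]
  by_cases h0 : sig * f = 0
  · rw [h0]
    norm_num [Nat.log2]
  · have hiff : sig * f < 2 ^ 53 ↔ Nat.log2 (sig * f) + 1 ≤ 53 := by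
      rw [← Nat.log2_lt h0]
      omega
    by_cases hs : sig * f < 2 ^ 53
    · rw [if_pos hs, if_pos (hiff.mp hs)]
    · have h53 : 2 ^ 53 ≤ sig * f := by omega
      have hlog : 53 ≤ Nat.log2 (sig * f) := by
        by_contra hc
        exact hs ((Nat.log2_lt h0).mp (by omega))
      rw [if_neg hs, if_neg (fun hle => hs (hiff.mpr hle))]
      have hd : Nat.log2 (sig * f) - 52 = Nat.log2 (sig * f) + 1 - 53 := by omega
      rw [hd, pvHalfEven_eq _ _ (Nat.two_pow_pos _)]

theorem pvToInt_eq (sig : Nat) (ex : Int) : pvToInt sig ex = pvF64ToIntRNE sig ex := by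
  unfold pvToInt pvF64ToIntRNE
  by_cases h : ex < 0
  · rw [if_pos h, if_neg (by omega), pvHalfEven_eq _ _ (Nat.two_pow_pos _)]
  · rw [if_neg h, if_pos (by omega), Nat.shiftLeft_eq]

theorem pyRoundB_eq (p c : Int) : pyRoundB p c = pyRoundPctCount p c := by
  simp only [pyRoundB, pyRoundPctCount]
  by_cases hp : p = 0
  · simp [hp]
  by_cases hc : c = 0
  · simp [hp, hc]
  have hor : ¬(p = 0 ∨ c = 0) := by tauto
  rw [if_neg hp, if_neg hc, if_neg hor, pvQuot100_eq, pvTimes_eq, pvToInt_eq]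
  by_cases hps : p < 0 <;> by_cases hcs : c < 0
  · rw [if_neg (by simp [hps, hcs]), if_pos (Or.inr ⟨hps, hcs⟩), one_mul]
  · rw [if_pos (by simp [hps, hcs]), if_neg (by omega), neg_one_mul]
  · rw [if_pos (by simp [hps, hcs]), if_neg (by omega), neg_one_mul]
  · rw [if_neg (by simp [hps, hcs]), if_pos (Or.inl ⟨by omega, by omega⟩), one_mul]

-- abbreviations for the descending stable insertion sort A's `sorted(..., reverse=True)` performs
def pvIns (acc : List (String × Int)) (x : String × Int) : List (String × Int) :=
  PySem.List.insertBy (fun a b => decide (b.2 < a.2)) x acc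

def pvS (l : List (String × Int)) : List (String × Int) :=
  PySem.List.sorted l (fun p => p.2) true

-- "insert before the first element of key ≤ key x" (front-stable descending insert)
def pvInsF (x : String × Int) : List (String × Int) → List (String × Int)
  | [] => [x]
  | y :: ys => if y.2 ≤ x.2 then x :: y :: ys else y :: pvInsF x ys

theorem pvS_eq_foldl (l : List (String × Int)) : pvS l = l.foldl pvIns [] := by
  simpa [pvS, pvIns] using PySem.List.sorted_rev_eq_foldl_insertBy l (fun p => p.2)

theorem pvIns_nil (x : String × Int) : pvIns [] x = [x] := rfl

theorem pvIns_cons (x y : String × Int) (ys : List (String × Int)) :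
    pvIns (y :: ys) x = if y.2 < x.2 then x :: y :: ys else y :: pvIns ys x := by
  simp [pvIns, PySem.List.insertBy]

-- front-stable and back-stable inserts commute
theorem pvCom (acc : List (String × Int)) (x y : String × Int) :
    pvIns (pvInsF x acc) y = pvInsF x (pvIns acc y) := by
  induction acc with
  | nil =>
    by_cases h : x.2 < y.2
    · simp [pvIns_cons, pvIns_nil, pvInsF, h, show ¬ y.2 ≤ x.2 by omega]
    · simp [pvIns_cons, pvIns_nil, pvInsF, h, show y.2 ≤ x.2 by omega]
  | cons z rest ih =>
    by_cases hzx : z.2 ≤ x.2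
    · by_cases hxy : x.2 < y.2
      · have hzy : z.2 < y.2 := by omega
        simp [pvInsF, pvIns_cons, hzx, hxy, hzy, show ¬ y.2 ≤ x.2 by omega]
      · by_cases hzy : z.2 < y.2
        · simp [pvInsF, pvIns_cons, hzx, hxy, hzy, show y.2 ≤ x.2 by omega]
        · simp [pvInsF, pvIns_cons, hzx, hxy, hzy]
    · have hxz : x.2 < z.2 := by omega
      by_cases hzy : z.2 < y.2
      · simp [pvInsF, pvIns_cons, hzx, hzy, show ¬ y.2 ≤ x.2 by omega]
      · simp [pvInsF, pvIns_cons, hzx, hzy, ih]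

theorem pvFoldl_insF (xs : List (String × Int)) (acc : List (String × Int)) (x : String × Int) :
    xs.foldl pvIns (pvInsF x acc) = pvInsF x (xs.foldl pvIns acc) := by
  induction xs generalizing acc with
  | nil => rfl
  | cons y ys ih => simpa [pvCom] using ih (pvIns acc y)

theorem pvS_nil : pvS [] = [] := by simp [pvS_eq_foldl]

theorem pvS_cons (x : String × Int) (xs : List (String × Int)) :
    pvS (x :: xs) = pvInsF x (pvS xs) := by
  have h1 : pvS (x :: xs) = xs.foldl pvIns (pvInsF x []) := by
    simp [pvS_eq_foldl, List.foldl_cons, pvIns_nil, pvInsF]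
  rw [h1, pvFoldl_insF, ← pvS_eq_foldl]

theorem pvGetD_eq (xs : List (String × Int)) (j : Nat) (hj : j < xs.length) :
    xs.getD j ("", 0) = xs[j] := by
  rw [List.getD_eq_getElem?_getD, List.getElem?_eq_getElem hj]; rfl

theorem pvMaxMem (xs : List (String × Int)) (i : Nat)
    (hmax : ∀ j, j < xs.length → (xs.getD j ("", 0)).2 ≤ (xs.getD i ("", 0)).2) :
    ∀ y ∈ xs, y.2 ≤ (xs.getD i ("", 0)).2 := by
  intro y hy
  obtain ⟨j, hj, rfl⟩ := List.mem_iff_getElem.mp hy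
  have := hmax j hj
  rwa [pvGetD_eq xs j hj] at this

-- invariant of Source B's scan for the first maximal element
theorem pvScan (l : List (String × Int)) :
    ∀ (k a mi : Nat), a + k = l.length → mi < a →
    (∀ j, j < a → (l.getD j ("", 0)).2 ≤ (l.getD mi ("", 0)).2) →
    (∀ j, j < mi → (l.getD j ("", 0)).2 < (l.getD mi ("", 0)).2) →
    ∃ mi' : Nat,
      (PySem.List.pyRange (a : Int) (l.length : Int) 1).foldl
        (fun mi j =>
          if (PySem.List.pyGetD l j ("", 0)).2 > (PySem.List.pyGetD l mi ("", 0)).2 then j else mi)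
        (mi : Int) = (mi' : Int) ∧ mi' < l.length ∧
      (∀ j, j < l.length → (l.getD j ("", 0)).2 ≤ (l.getD mi' ("", 0)).2) ∧
      (∀ j, j < mi' → (l.getD j ("", 0)).2 < (l.getD mi' ("", 0)).2) := by
  intro k
  induction k with
  | zero =>
    intro a mi ha hmia hle hlt
    have hrange : PySem.List.pyRange (a : Int) (l.length : Int) 1 = [] := by
      rw [PySem.List.pyRange_one]
      have : ((l.length : Int) - (a : Int)).toNat = 0 := by omega
      simp [this]
    refine ⟨mi, ?_, by omega, ?_, hlt⟩
    · rw [hrange]; rfl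
    · intro j hj; exact hle j (by omega)
  | succ k ih =>
    intro a mi ha hmia hle hlt
    have hab : (a : Int) < (l.length : Int) := by omega
    rw [PySem.List.pyRange_one_cons hab, List.foldl_cons]
    have hcast : (a : Int) + 1 = ((a + 1 : Nat) : Int) := by push_cast; ring
    simp only [PySem.List.pyGetD_natCast]
    by_cases hgt : (l.getD (a : Nat) ("", 0)).2 > (l.getD mi ("", 0)).2
    · rw [if_pos hgt, hcast]
      exact ih (a + 1) a (by omega) (by omega)
        (fun j hj => by
          rcases Nat.lt_succ_iff_lt_or_eq.mp hj with h | h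
          · exact le_trans (hle j h) (le_of_lt hgt)
          · subst h; exact le_refl _)
        (fun j hj => lt_of_le_of_lt (hle j hj) hgt)
    · rw [if_neg hgt, hcast]
      exact ih (a + 1) mi (by omega) (by omega)
        (fun j hj => by
          rcases Nat.lt_succ_iff_lt_or_eq.mp hj with h | h
          · exact hle j h
          · subst h; omega)
        hlt

theorem pvBMaxIdx_spec (l : List (String × Int)) (h : l ≠ []) :
    ∃ mi : Nat, pvBMaxIdx l = (mi : Int) ∧ mi < l.length ∧
      (∀ j, j < l.length → (l.getD j ("", 0)).2 ≤ (l.getD mi ("", 0)).2) ∧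
      (∀ j, j < mi → (l.getD j ("", 0)).2 < (l.getD mi ("", 0)).2) := by
  have hlen : 0 < l.length := List.length_pos_iff.mpr h
  have := pvScan l (l.length - 1) 1 0 (by omega) (by omega)
    (fun j hj => by interval_cases j; exact le_refl _)
    (fun j hj => by omega)
  simpa [pvBMaxIdx] using this

theorem pvUniq (l : List (String × Int)) (i₁ i₂ : Nat) (h₁ : i₁ < l.length) (h₂ : i₂ < l.length)
    (m₁ : ∀ j, j < l.length → (l.getD j ("", 0)).2 ≤ (l.getD i₁ ("", 0)).2)
    (s₁ : ∀ j, j < i₁ → (l.getD j ("", 0)).2 < (l.getD i₁ ("", 0)).2)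
    (m₂ : ∀ j, j < l.length → (l.getD j ("", 0)).2 ≤ (l.getD i₂ ("", 0)).2)
    (s₂ : ∀ j, j < i₂ → (l.getD j ("", 0)).2 < (l.getD i₂ ("", 0)).2) : i₁ = i₂ := by
  rcases lt_trichotomy i₁ i₂ with h | h | h
  · have := s₂ i₁ h
    have := m₂ i₁ (by omega)
    have := m₁ i₂ h₂
    omega
  · exact h
  · have := s₁ i₂ h
    have := m₁ i₂ (by omega)
    have := m₂ i₁ h₁
    omega

theorem pvBMaxIdx_cons_zero (x : String × Int) (xs : List (String × Int))
    (h : ∀ y ∈ xs, y.2 ≤ x.2) : pvBMaxIdx (x :: xs) = 0 := by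
  obtain ⟨mi, hInt, hlt, hmax, hstrict⟩ := pvBMaxIdx_spec (x :: xs) (by simp)
  have hzero : mi = 0 := by
    refine pvUniq (x :: xs) mi 0 hlt (by simp) hmax hstrict ?_ (by omega)
    intro j hj
    cases j with
    | zero => exact le_refl _
    | succ j' =>
      simp only [List.getD_cons_succ, List.getD_cons_zero]
      have hj' : j' < xs.length := by simpa using hj
      have : xs.getD j' ("", 0) ∈ xs := by
        rw [pvGetD_eq xs j' hj']; exact List.getElem_mem hj'
      exact h _ this
  rw [hInt, hzero]; rfl

theorem pvBMaxIdx_cons_succ (x : String × Int) (xs : List (String × Int))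
    (h : ∃ y ∈ xs, x.2 < y.2) : pvBMaxIdx (x :: xs) = pvBMaxIdx xs + 1 := by
  obtain ⟨y, hy, hxy⟩ := h
  have hne : xs ≠ [] := by rintro rfl; simp at hy
  obtain ⟨i, hI, hilt, hmax, hstrict⟩ := pvBMaxIdx_spec xs hne
  obtain ⟨mi, hInt, hlt, hmax', hstrict'⟩ := pvBMaxIdx_spec (x :: xs) (by simp)
  have hxM : x.2 < (xs.getD i ("", 0)).2 :=
    lt_of_lt_of_le hxy (pvMaxMem xs i hmax y hy)
  have hsucc : mi = i + 1 := by
    refine pvUniq (x :: xs) mi (i + 1) hlt (by simp; omega) hmax' hstrict' ?_ ?_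
    · intro j hj
      cases j with
      | zero => simpa using le_of_lt hxM
      | succ j' =>
        simp only [List.getD_cons_succ]
        exact hmax j' (by simpa using hj)
    · intro j hj
      cases j with
      | zero => simpa using hxM
      | succ j' =>
        simp only [List.getD_cons_succ]
        exact hstrict j' (by omega)
  rw [hInt, hI, hsucc]; push_cast; ring

-- selection lemma: the stable descending sort is (first max) :: sort of the rest
theorem pvSel (l : List (String × Int)) (h : l ≠ []) :
    ∃ mi : Nat, pvBMaxIdx l = (mi : Int) ∧ mi < l.length ∧
      pvS l = l.getD mi ("", 0) :: pvS (l.eraseIdx mi) := by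
  induction l with
  | nil => exact absurd rfl h
  | cons x xs ih =>
    by_cases hxs : xs = []
    · subst hxs
      refine ⟨0, ?_, by simp, ?_⟩
      · exact pvBMaxIdx_cons_zero x [] (by simp)
      · simp [pvS_cons, pvS_nil, pvInsF]
    · obtain ⟨i, hI, hilt, hS⟩ := ih hxs
      obtain ⟨i', hI', hilt', hmaxI, _⟩ := pvBMaxIdx_spec xs hxs
      have hii : i = i' := by
        have := hI.symm.trans hI'
        exact_mod_cast this
      subst hii
      by_cases hb : ∀ y ∈ xs, y.2 ≤ x.2
      · refine ⟨0, pvBMaxIdx_cons_zero x xs hb, by simp, ?_⟩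
        simp only [List.getD_cons_zero, List.eraseIdx_cons_zero]
        rw [pvS_cons, hS]
        have hmem : xs.getD i ("", 0) ∈ xs := by
          rw [pvGetD_eq xs i hilt]; exact List.getElem_mem hilt
        rw [pvInsF, if_pos (hb _ hmem), ← hS]
      · push Not at hb
        obtain ⟨y, hy, hxy⟩ := hb
        have hxM : x.2 < (xs.getD i ("", 0)).2 :=
          lt_of_lt_of_le hxy (pvMaxMem xs i hmaxI y hy)
        refine ⟨i + 1, ?_, by simp; omega, ?_⟩
        · rw [pvBMaxIdx_cons_succ x xs ⟨y, hy, hxy⟩, hI]; push_cast; ring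
        · simp only [List.getD_cons_succ, List.eraseIdx_cons_succ]
          rw [pvS_cons, hS, pvInsF, if_neg (by omega), ← pvS_cons]

-- the tail of A (process all but the last sorted item, then the remainder), structurally
def pvARun (count : Int) : List (String × Int) → PySem.Dict String Int → Int → List (String × Int)
  | [], dist, _ => dist.items
  | [x], dist, total => (dist.insert x.1 (max 0 (count - total))).items
  | x :: y :: t, dist, total =>
      pvARun count (y :: t) (dist.insert x.1 (pyRoundPctCount x.2 count)) (total + pyRoundPctCount x.2 count)

theorem pvARun_eq (count : Int) (sl : List (String × Int)) (dist : PySem.Dict String Int) (total : Int) :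
    (match PySem.List.pyGet? sl (-1) with
      | none => (sl.dropLast.foldl
          (fun (st : PySem.Dict String Int × Int) lp =>
            let num := pyRoundPctCount lp.2 count
            (st.1.insert lp.1 num, st.2 + num)) (dist, total)).1.items
      | some last =>
          (((sl.dropLast.foldl
          (fun (st : PySem.Dict String Int × Int) lp =>
            let num := pyRoundPctCount lp.2 count
            (st.1.insert lp.1 num, st.2 + num)) (dist, total))).1.insert last.1
            (max 0 (count - (sl.dropLast.foldl
          (fun (st : PySem.Dict String Int × Int) lp =>
            let num := pyRoundPctCount lp.2 count
            (st.1.insert lp.1 num, st.2 + num)) (dist, total)).2))).items)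
    = pvARun count sl dist total := by
  induction sl generalizing dist total with
  | nil => simp [PySem.List.pyGet?_neg_one, pvARun]
  | cons x rest ih =>
    cases rest with
    | nil => simp [PySem.List.pyGet?_neg_one, pvARun]
    | cons y t =>
      have hl : PySem.List.pyGet? (x :: y :: t) (-1) = PySem.List.pyGet? (y :: t) (-1) := by
        rw [PySem.List.pyGet?_neg_one, PySem.List.pyGet?_neg_one, List.getLast?_cons_cons]
      have hd : (x :: y :: t).dropLast = x :: (y :: t).dropLast := rfl
      rw [hl, hd, List.foldl_cons]
      exact ih (dist.insert x.1 (pyRoundPctCount x.2 count)) (total + pyRoundPctCount x.2 count)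

theorem pvMainAux (count : Int) : ∀ (n : Nat) (l : List (String × Int))
    (dist : PySem.Dict String Int) (total : Int), l.length = n → l ≠ [] →
    pvBLoop count l dist total = pvARun count (pvS l) dist total := by
  intro n
  induction n using Nat.strong_induction_on with
  | _ n ih =>
    intro l dist total hn hne
    obtain ⟨mi, hmiInt, hmilt, hSel⟩ := pvSel l hne
    rw [pvBLoop]
    by_cases h1 : 1 < l.length
    · rw [dif_pos h1]
      have hpop : PySem.List.pop? l (pvBMaxIdx l) = some (l[mi]'hmilt, l.eraseIdx mi) := by
        rw [hmiInt]; exact PySem.List.pop?_natCast l mi hmilt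
      have hrlen : (l.eraseIdx mi).length = l.length - 1 := by
        simp [List.length_eraseIdx, hmilt]
      have hrne : l.eraseIdx mi ≠ [] := by
        intro hc
        rw [hc] at hrlen
        simp at hrlen
        omega
      split
      · rename_i lp hp
        rw [hpop] at hp
        injection hp with hp
        subst hp
        have hm : l.getD mi ("", 0) = l[mi]'hmilt := pvGetD_eq l mi hmilt
        rw [hSel, hm]
        have hSne : pvS (l.eraseIdx mi) ≠ [] := by
          intro hc
          exact hrne ((PySem.List.sorted_eq_nil_iff _ _ _).mp hc)
        rcases hq : pvS (l.eraseIdx mi) with _ | ⟨z, zt⟩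
        · exact absurd hq hSne
        · simp only [pyRoundB_eq]
          rw [pvARun, ← hq]
          exact ih (l.length - 1) (by omega) (l.eraseIdx mi) _ _ (by omega) hrne
      · rename_i hp
        rw [hpop] at hp
        exact absurd hp (by simp)
    · rw [dif_neg h1]
      have hmi0 : mi = 0 := by omega
      subst hmi0
      rcases l with _ | ⟨a, _ | ⟨b, t⟩⟩
      · exact absurd rfl hne
      · rw [PySem.List.pyGet?_zero_cons]
        simp only [List.getD_cons_zero, List.eraseIdx_cons_zero] at hSel
        rw [hSel, pvS_nil, pvARun]
      · simp at h1
  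
theorem pvMain (count : Int) (l : List (String × Int)) (dist : PySem.Dict String Int) (total : Int)
    (h : l ≠ []) : pvBLoop count l dist total = pvARun count (pvS l) dist total :=
  pvMainAux count l.length l dist total rfl h

-- ===== VERDICT (by name: the statement is the Claim_ definition above) =====
theorem calculate_section_blooms_py_spec : Claim_equal_calculate_section_blooms_py := by
  intro section_ overall_blooms count _hdom hpre
  unfold Spec_calculate_section_blooms_py
  unfold calculate_section_blooms_py calculate_section_blooms_py_alt
  dsimp only
  rw [PySem.List.slice_to_neg_one]
  rw [pvMain count overall_blooms PySem.Dict.empty 0 hpre]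
  exact (pvARun_eq count (pvS overall_blooms) PySem.Dict.empty 0)
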